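-- pv_equiv track=rewrite | github.com/agruber/insect-pol-iii | scripts/align_promoters.py | align_sequences_by_anchors
-- ===== SOURCE A (Python) =====
-- from typing import List, Tuple, Dict, Set, Optional
--
-- def align_sequences_by_anchors(sequences: List[str], anchor_positions: List[Optional[int]], k: int) -> Tuple[List[str], List[int], List[int]]:
--     """
--     Align sequences by placing anchor k-mers at the same column.
--     Sequences without anchors are kept separate.
--
--     Args:
--         sequences: List of DNA sequences
--         anchor_positions: Position of anchor in each sequence
--         k: k-mer length
--
--     Returns:
--         Tuple of:
--         - List of all aligned sequences (anchored first, then non-anchored)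
--         - List of indices for anchored sequences
--         - List of indices for non-anchored sequences
--     """
--     # Separate sequences with and without anchors
--     anchored_indices = [i for i, pos in enumerate(anchor_positions) if pos is not None]
--     non_anchored_indices = [i for i, pos in enumerate(anchor_positions) if pos is None]
--
--     if not anchored_indices:
--         # No anchors found, return original sequences with gaps
--         max_len = max(len(s) for s in sequences) if sequences else 0
--         aligned = [s + '-' * (max_len - len(s)) for s in sequences]
--         return aligned, [], list(range(len(sequences)))
--
--     # Find the maximum anchor position to use as alignment target
--     max_anchor_pos = max(anchor_positions[i] for i in anchored_indices)
--
--     # First, align sequences WITH anchors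
--     aligned_anchored = []
--     for i in anchored_indices:
--         # Add gaps to align anchor at max_anchor_pos position
--         left_pad = max_anchor_pos - anchor_positions[i]
--         aligned_seq = '-' * left_pad + sequences[i]
--         aligned_anchored.append(aligned_seq)
--
--     # Find max length of anchored sequences
--     max_len = max(len(s) for s in aligned_anchored) if aligned_anchored else 0
--
--     # Pad anchored sequences to same length
--     aligned_anchored = [s + '-' * (max_len - len(s)) for s in aligned_anchored]
--
--     # Now handle sequences WITHOUT anchors - include sequence and pad with gaps
--     aligned_non_anchored = []
--     for i in non_anchored_indices:
--         # Add the original sequence and pad with gaps to match alignment length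
--         seq_len = len(sequences[i])
--         if seq_len < max_len:
--             # Pad sequence to match alignment length
--             aligned_seq = sequences[i] + '-' * (max_len - seq_len)
--         else:
--             # If sequence is longer than current max, use it as is
--             # and we'll need to update max_len
--             aligned_seq = sequences[i]
--         aligned_non_anchored.append(aligned_seq)
--
--     # Update max_len if any non-anchored sequence is longer
--     if aligned_non_anchored:
--         max_len = max(max_len, max(len(s) for s in aligned_non_anchored))
--         # Re-pad all sequences to new max length
--         aligned_anchored = [s + '-' * (max_len - len(s)) for s in aligned_anchored]
--         aligned_non_anchored = [s + '-' * (max_len - len(s)) for s in aligned_non_anchored]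
--
--     # Combine all sequences: anchored first, then non-anchored
--     all_aligned = aligned_anchored + aligned_non_anchored
--
--     return all_aligned, anchored_indices, non_anchored_indices
-- ===== SOURCE B (Python) =====
-- from typing import List, Tuple, Optional
--
-- def align_sequences_by_anchors(sequences: List[str], anchor_positions: List[Optional[int]], k: int) -> Tuple[List[str], List[int], List[int]]:
--     anchored_indices = [i for i, pos in enumerate(anchor_positions) if pos is not None]
--     non_anchored_indices = [i for i, pos in enumerate(anchor_positions) if pos is None]
--     order = anchored_indices + non_anchored_indices
--     m = max((pos for pos in anchor_positions if pos is not None), default=0)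
--     offsets = [m - pos if pos is not None else 0 for pos in anchor_positions]
--     total = max((offsets[i] + len(sequences[i]) for i in order), default=0)
--     aligned = ['-' * offsets[i] + sequences[i] + '-' * (total - offsets[i] - len(sequences[i]))
--                for i in order]
--     return aligned, anchored_indices, non_anchored_indices
-- ===== Notes on version B (the rewrite author's own statement) =====
-- stated objective: simpler
-- what changed: Replaces A's four staged padding passes (pad anchored, measure, re-pad, pad non-anchored, conditionally re-pad everything) and its special no-anchor branch by one closed-form pass: a per-index left offset, one global target length, and each output built in a single step as '-'*offset + seq + '-'*(total-offset-len); no branch on whether anchors exist.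
-- outside the precondition, e.g. on align_sequences_by_anchors(['a', 'bb'], [None], 0): A returns (['a-', 'bb'], [], [0, 1]), B returns (['a'], [], [0]); on align_sequences_by_anchors(['ab'], [None, None], 0): A returns (['ab'], [], [0]), B raises IndexError
import Mathlib
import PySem

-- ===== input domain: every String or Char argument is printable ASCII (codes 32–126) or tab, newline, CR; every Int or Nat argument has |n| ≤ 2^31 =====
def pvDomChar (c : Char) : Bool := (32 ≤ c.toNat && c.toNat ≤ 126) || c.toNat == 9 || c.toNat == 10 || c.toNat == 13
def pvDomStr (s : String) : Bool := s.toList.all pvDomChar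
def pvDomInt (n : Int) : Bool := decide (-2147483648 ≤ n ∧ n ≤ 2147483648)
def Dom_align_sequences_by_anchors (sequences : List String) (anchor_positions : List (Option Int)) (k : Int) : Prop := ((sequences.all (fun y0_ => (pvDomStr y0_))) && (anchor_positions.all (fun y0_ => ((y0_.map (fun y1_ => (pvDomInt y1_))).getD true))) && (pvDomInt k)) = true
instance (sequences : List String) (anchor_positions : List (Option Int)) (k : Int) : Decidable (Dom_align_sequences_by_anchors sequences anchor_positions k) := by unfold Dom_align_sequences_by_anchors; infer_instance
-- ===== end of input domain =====

-- B re-implements A's staged padding as one closed-form pass (offset + one global length);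
-- equivalence is proved on lists of equal length (the function's natural domain).

-- shared helpers (the identical comprehensions / primitive accesses both Pythons perform)
def pvGaps (n : Int) : List Char := List.replicate n.toNat '-'   -- '-' * n
def pvAnch (ap : List (Option Int)) : List Int :=
  ((PySem.List.enumerate ap 0).filter (fun p => p.2.isSome)).map (fun p => p.1)
def pvNon (ap : List (Option Int)) : List Int :=
  ((PySem.List.enumerate ap 0).filter (fun p => p.2.isNone)).map (fun p => p.1)
def pvPos (ap : List (Option Int)) (i : Int) : Int := (PySem.List.pyGetD ap i none).getD 0
def pvSeq (sequences : List String) (i : Int) : List Char := (PySem.List.pyGetD sequences i "").toList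

-- ===== PORT A =====
def pvMaxLen0 (sequences : List String) : Int :=
  if sequences ≠ [] then (PySem.List.max? (sequences.map (fun s => (s.toList.length : Int))) (fun x => x)).getD 0 else 0
def pvMaxA (ap : List (Option Int)) : Int :=
  (PySem.List.max? ((pvAnch ap).map (fun i => pvPos ap i)) (fun x => x)).getD 0
def pvAA (sequences : List String) (ap : List (Option Int)) : List (List Char) :=
  (pvAnch ap).map (fun i => pvGaps (pvMaxA ap - pvPos ap i) ++ pvSeq sequences i)
def pvML (sequences : List String) (ap : List (Option Int)) : Int :=
  if pvAA sequences ap ≠ [] then (PySem.List.max? ((pvAA sequences ap).map (fun s => (s.length : Int))) (fun x => x)).getD 0 else 0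
def pvAA2 (sequences : List String) (ap : List (Option Int)) : List (List Char) :=
  (pvAA sequences ap).map (fun s => s ++ pvGaps (pvML sequences ap - (s.length : Int)))
def pvAN (sequences : List String) (ap : List (Option Int)) : List (List Char) :=
  (pvNon ap).map (fun i =>
    if ((pvSeq sequences i).length : Int) < pvML sequences ap then
      pvSeq sequences i ++ pvGaps (pvML sequences ap - ((pvSeq sequences i).length : Int))
    else pvSeq sequences i)
def pvML2 (sequences : List String) (ap : List (Option Int)) : Int :=
  max (pvML sequences ap) ((PySem.List.max? ((pvAN sequences ap).map (fun s => (s.length : Int))) (fun x => x)).getD 0)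

def align_sequences_by_anchors (sequences : List String) (anchor_positions : List (Option Int)) (k : Int) : List String × List Int × List Int :=
  if pvAnch anchor_positions = [] then
    (sequences.map (fun s => String.ofList (s.toList ++ pvGaps (pvMaxLen0 sequences - (s.toList.length : Int)))),
     ([] : List Int), PySem.List.pyRange 0 (sequences.length : Int) 1)
  else if pvAN sequences anchor_positions ≠ [] then
    (((pvAA2 sequences anchor_positions).map (fun s => s ++ pvGaps (pvML2 sequences anchor_positions - (s.length : Int))) ++
      (pvAN sequences anchor_positions).map (fun s => s ++ pvGaps (pvML2 sequences anchor_positions - (s.length : Int)))).map String.ofList,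
     pvAnch anchor_positions, pvNon anchor_positions)
  else
    ((pvAA2 sequences anchor_positions ++ pvAN sequences anchor_positions).map String.ofList,
     pvAnch anchor_positions, pvNon anchor_positions)

-- ===== PORT B =====
def pvM (ap : List (Option Int)) : Int := PySem.List.maxD (ap.filterMap (fun p => p)) (fun x => x) 0
def pvOff (ap : List (Option Int)) : List Int :=
  ap.map (fun p => match p with | some q => pvM ap - q | none => 0)
def pvOffI (ap : List (Option Int)) (i : Int) : Int := PySem.List.pyGetD (pvOff ap) i 0
def pvL (sequences : List String) (ap : List (Option Int)) : Int :=
  PySem.List.maxD ((pvAnch ap ++ pvNon ap).map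
    (fun i => pvOffI ap i + ((pvSeq sequences i).length : Int))) (fun x => x) 0

def align_sequences_by_anchors_alt (sequences : List String) (anchor_positions : List (Option Int)) (k : Int) : List String × List Int × List Int :=
  ((pvAnch anchor_positions ++ pvNon anchor_positions).map (fun i =>
      String.ofList (pvGaps (pvOffI anchor_positions i) ++ pvSeq sequences i ++
        pvGaps (pvL sequences anchor_positions - pvOffI anchor_positions i - ((pvSeq sequences i).length : Int)))),
   pvAnch anchor_positions, pvNon anchor_positions)

-- ===== PRECONDITION & SPEC =====
-- Pre_ excludes only the length-mismatched inputs A cannot be matched on: with more anchor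
-- positions than sequences A raises IndexError (except in its all-None branch, which also
-- accidentally returns range(len(sequences)) instead of the non-anchored indices whenever the
-- lengths differ) — a defensible-corner artefact of mismatched argument lists.
def Pre_align_sequences_by_anchors (sequences : List String) (anchor_positions : List (Option Int)) (k : Int) : Prop :=
  sequences.length = anchor_positions.length ∨
    (anchor_positions.any (fun p => p.isSome) = true ∧ anchor_positions.length ≤ sequences.length)
instance (sequences : List String) (anchor_positions : List (Option Int)) (k : Int) : Decidable (Pre_align_sequences_by_anchors sequences anchor_positions k) := by unfold Pre_align_sequences_by_anchors; infer_instance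
def pvWitness_align_sequences_by_anchors : List String × List (Option Int) × Int := (["ACGT", "GG"], [some 1, none], 2)

def Spec_align_sequences_by_anchors (sequences : List String) (anchor_positions : List (Option Int)) (k : Int) (out : List String × List Int × List Int) : Prop := out = align_sequences_by_anchors_alt sequences anchor_positions k
instance (sequences : List String) (anchor_positions : List (Option Int)) (k : Int) (out : List String × List Int × List Int) : Decidable (Spec_align_sequences_by_anchors sequences anchor_positions k out) := by unfold Spec_align_sequences_by_anchors; infer_instance

-- ===== CLAIM (what is proved, stated in full; the proofs are below) =====
def Claim_equal_align_sequences_by_anchors : Prop := ∀ (sequences : List String) (anchor_positions : List (Option Int)) (k : Int), Dom_align_sequences_by_anchors sequences anchor_positions k → Pre_align_sequences_by_anchors sequences anchor_positions k → Spec_align_sequences_by_anchors sequences anchor_positions k (align_sequences_by_anchors sequences anchor_positions k)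

-- ===== LEMMAS AND PROOFS =====

-- running maximum (with 0 joined in), the common value of all the max computations above
def pvMax (l : List Int) : Int := l.foldl max 0
def pvV (sequences : List String) (ap : List (Option Int)) (i : Int) : Int :=
  pvOffI ap i + ((pvSeq sequences i).length : Int)

lemma pvMax_nonneg (l : List Int) : 0 ≤ pvMax l := (PySem.List.le_foldl_max l 0).1

lemma le_pvMax {l : List Int} {x : Int} (hx : x ∈ l) : x ≤ pvMax l :=
  (PySem.List.le_foldl_max l 0).2 x hx

lemma pvMax_le_iff {l : List Int} {a : Int} : pvMax l ≤ a ↔ 0 ≤ a ∧ ∀ x ∈ l, x ≤ a := by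
  constructor
  · intro h; exact ⟨le_trans (pvMax_nonneg l) h, fun x hx => le_trans (le_pvMax hx) h⟩
  · rintro ⟨h0, h⟩
    rcases PySem.List.foldl_max_mem l 0 with he | hm
    · unfold pvMax; rw [he]; exact h0
    · exact h _ hm

lemma pvMax_append (l1 l2 : List Int) : pvMax (l1 ++ l2) = max (pvMax l1) (pvMax l2) := by
  apply le_antisymm
  · rw [pvMax_le_iff]
    refine ⟨le_max_of_le_left (pvMax_nonneg l1), ?_⟩
    intro x hx
    rcases List.mem_append.1 hx with h | h
    · exact le_max_of_le_left (le_pvMax h)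
    · exact le_max_of_le_right (le_pvMax h)
  · apply max_le
    · exact pvMax_le_iff.2 ⟨pvMax_nonneg _, fun x hx => le_pvMax (List.mem_append_left _ hx)⟩
    · exact pvMax_le_iff.2 ⟨pvMax_nonneg _, fun x hx => le_pvMax (List.mem_append_right _ hx)⟩

lemma pvMax_map_max (l : List Int) (f : Int → Int) (c : Int) (hne : l ≠ []) :
    pvMax (l.map (fun x => max (f x) c)) = max (pvMax (l.map f)) c := by
  apply le_antisymm
  · rw [pvMax_le_iff]
    refine ⟨le_max_of_le_left (pvMax_nonneg _), ?_⟩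
    rintro x hx
    obtain ⟨y, hy, rfl⟩ := List.mem_map.1 hx
    exact max_le (le_max_of_le_left (le_pvMax (List.mem_map_of_mem hy))) (le_max_right _ _)
  · apply max_le
    · rw [pvMax_le_iff]
      refine ⟨pvMax_nonneg _, ?_⟩
      rintro x hx
      obtain ⟨y, hy, rfl⟩ := List.mem_map.1 hx
      exact le_trans (le_max_left _ c) (le_pvMax (List.mem_map_of_mem hy))
    · obtain ⟨y, hy⟩ := List.exists_mem_of_ne_nil l hne
      exact le_trans (le_max_right (f y) c) (le_pvMax (List.mem_map_of_mem hy))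

lemma maxD_eq (l : List Int) :
    PySem.List.maxD l (fun x => x) 0 = (PySem.List.max? l (fun x => x)).getD 0 := by
  cases l <;> simp [PySem.List.maxD, PySem.List.max?]

lemma max?_getD_eq_pvMax (l : List Int) (h0 : ∀ x ∈ l, 0 ≤ x) :
    (PySem.List.max? l (fun x => x)).getD 0 = pvMax l := by
  cases l with
  | nil => simp [PySem.List.max?, pvMax]
  | cons x t =>
    rw [PySem.List.max?_id_cons, Option.getD_some]
    unfold pvMax
    rw [List.foldl_cons, max_eq_right (h0 x (List.mem_cons_self ..))]

lemma maxD_id_isMax {l : List Int} {x : Int} (hx : x ∈ l) :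
    x ≤ PySem.List.maxD l (fun y => y) 0 := by
  obtain ⟨m, hm⟩ : ∃ m, PySem.List.max? l (fun y => y) = some m := by
    cases h : PySem.List.max? l (fun y => y) with
    | none => exact absurd ((PySem.List.max?_eq_none_iff _ _).1 h) (List.ne_nil_of_mem hx)
    | some m => exact ⟨m, rfl⟩
  rw [maxD_eq, hm, Option.getD_some]
  exact PySem.List.max?_isMax hm x hx

-- structural facts about the enumerate comprehensions
lemma pv_enum_mem {ap : List (Option Int)} {p : Int × Option Int}
    (hp : p ∈ PySem.List.enumerate ap 0) :
    ∃ j : Nat, p.1 = (j : Int) ∧ ∃ h : j < ap.length, p.2 = ap[j] := by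
  obtain ⟨k, hk, rfl⟩ := (PySem.List.mem_enumerate_iff _ _ _).1 hp
  exact ⟨k, by simp, hk, rfl⟩

lemma pvPos_at {ap : List (Option Int)} {j : Nat} (hj : j < ap.length) :
    pvPos ap (j : Int) = (ap[j]).getD 0 := by
  unfold pvPos
  rw [PySem.List.pyGetD_natCast, List.getD_eq_getElem?_getD, List.getElem?_eq_getElem hj,
    Option.getD_some]

lemma pvOffI_at {ap : List (Option Int)} {j : Nat} (hj : j < ap.length) :
    pvOffI ap (j : Int) = (match ap[j] with | some q => pvM ap - q | none => 0) := by
  unfold pvOffI pvOff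
  rw [PySem.List.pyGetD_natCast, List.getD_eq_getElem?_getD, List.getElem?_map,
    List.getElem?_eq_getElem hj]
  rfl

lemma mem_anch {ap : List (Option Int)} {i : Int} (h : i ∈ pvAnch ap) :
    ∃ (j : Nat) (q : Int), i = (j : Int) ∧ ∃ hlt : j < ap.length, ap[j] = some q := by
  unfold pvAnch at h
  obtain ⟨p, hpf, rfl⟩ := List.mem_map.1 h
  have hpe := List.mem_filter.1 hpf
  obtain ⟨j, hj1, hjlt, hj2⟩ := pv_enum_mem hpe.1
  have hs : (ap[j]).isSome = true := hj2 ▸ hpe.2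
  obtain ⟨q, hq⟩ := Option.isSome_iff_exists.1 hs
  exact ⟨j, q, hj1, hjlt, hq⟩

lemma mem_non {ap : List (Option Int)} {i : Int} (h : i ∈ pvNon ap) :
    ∃ j : Nat, i = (j : Int) ∧ ∃ hlt : j < ap.length, ap[j] = none := by
  unfold pvNon at h
  obtain ⟨p, hpf, rfl⟩ := List.mem_map.1 h
  have hpe := List.mem_filter.1 hpf
  obtain ⟨j, hj1, hjlt, hj2⟩ := pv_enum_mem hpe.1
  exact ⟨j, hj1, hjlt, by rw [← hj2]; exact Option.isNone_iff_eq_none.1 hpe.2⟩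

lemma filter_isSome_map_getD (l : List (Option Int)) :
    (l.filter (fun o => o.isSome)).map (fun o => o.getD 0) = l.filterMap (fun p => p) := by
  induction l with
  | nil => rfl
  | cons x t ih => cases x <;> simp [ih]

lemma anch_map_pos (ap : List (Option Int)) :
    (pvAnch ap).map (fun i => pvPos ap i) = ap.filterMap (fun p => p) := by
  unfold pvAnch
  rw [List.map_map]
  have h1 : ((PySem.List.enumerate ap 0).filter (fun p => p.2.isSome)).map
        ((fun i => pvPos ap i) ∘ (fun p => p.1))
      = ((PySem.List.enumerate ap 0).filter (fun p => p.2.isSome)).map (fun p => p.2.getD 0) := by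
    apply List.map_congr_left
    intro p hp
    have hpe := List.mem_filter.1 hp
    obtain ⟨j, hj1, hjlt, hj2⟩ := pv_enum_mem hpe.1
    simp only [Function.comp_apply]
    rw [hj1, pvPos_at hjlt, hj2]
  rw [h1]
  have h2 : ((PySem.List.enumerate ap 0).filter (fun p => p.2.isSome)).map (fun p => p.2.getD 0)
      = (((PySem.List.enumerate ap 0).filter (fun p => p.2.isSome)).map (fun p => p.2)).map
          (fun o => o.getD 0) := by rw [List.map_map]; rfl
  rw [h2]
  have h3 : ((PySem.List.enumerate ap 0).filter (fun p => p.2.isSome)).map (fun p => p.2)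
      = ((PySem.List.enumerate ap 0).map (fun p => p.2)).filter (fun o => o.isSome) := by
    rw [List.filter_map]
    rfl
  rw [h3, PySem.List.map_snd_enumerate, filter_isSome_map_getD]

lemma non_empty_case (ap : List (Option Int)) (h : pvAnch ap = []) :
    pvNon ap = PySem.List.pyRange 0 (ap.length : Int) 1 := by
  unfold pvAnch at h
  have hfil := List.map_eq_nil_iff.1 h
  have hall := List.filter_eq_nil_iff.1 hfil
  unfold pvNon
  have h4 : (PySem.List.enumerate ap 0).filter (fun p => p.2.isNone)
      = PySem.List.enumerate ap 0 := by
    apply List.filter_eq_self.2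
    intro p hp
    have := hall p hp
    simp only [Option.isNone_iff_eq_none]
    cases hc : p.2 with
    | none => rfl
    | some q => exact absurd (by rw [hc]; rfl) this
  rw [h4, PySem.List.map_fst_enumerate]
  simp

lemma anch_nil_iff (ap : List (Option Int)) :
    pvAnch ap = [] ↔ ap.any (fun p => p.isSome) = false := by
  unfold pvAnch
  rw [List.map_eq_nil_iff, List.filter_eq_nil_iff, List.any_eq_false]
  constructor
  · intro h o ho
    obtain ⟨j, hj, rfl⟩ := List.mem_iff_getElem.1 ho
    have hpmem : ((0 + (j : Int), ap[j]) : Int × Option Int) ∈ PySem.List.enumerate ap 0 :=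
      (PySem.List.mem_enumerate_iff _ _ _).2 ⟨j, hj, rfl⟩
    simpa using h _ hpmem
  · intro h p hp
    obtain ⟨j, hj1, hjlt, hj2⟩ := pv_enum_mem hp
    rw [hj2]
    simpa using h _ (List.getElem_mem hjlt)

-- gap-list facts
lemma pvGaps_zero : pvGaps 0 = [] := rfl

lemma gaps_merge (u : List Char) (a b : Int) (ha : 0 ≤ a) (hb : 0 ≤ b) :
    (u ++ pvGaps a) ++ pvGaps b = u ++ pvGaps (a + b) := by
  rw [List.append_assoc]
  congr 1
  unfold pvGaps
  rw [← List.replicate_add]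
  congr 1
  omega

-- the main equivalence on equal-length inputs
theorem pv_main (seqs : List String) (ap : List (Option Int)) (kk : Int)
    (hpre : seqs.length = ap.length ∨
      (ap.any (fun p => p.isSome) = true ∧ ap.length ≤ seqs.length)) :
    align_sequences_by_anchors seqs ap kk = align_sequences_by_anchors_alt seqs ap kk := by
  have hSeqLen : ∀ i : Int, (0 : Int) ≤ ((pvSeq seqs i).length : Int) := fun i => Int.natCast_nonneg _
  have hOffAnch : ∀ i ∈ pvAnch ap, pvOffI ap i = pvM ap - pvPos ap i ∧ 0 ≤ pvM ap - pvPos ap i := by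
    intro i hi
    obtain ⟨j, q, rfl, hjlt, hj⟩ := mem_anch hi
    have h1 : pvOffI ap (j : Int) = pvM ap - q := by rw [pvOffI_at hjlt, hj]
    have h2 : pvPos ap (j : Int) = q := by rw [pvPos_at hjlt, hj]; rfl
    have h3 : q ∈ ap.filterMap (fun p => p) :=
      List.mem_filterMap.2 ⟨some q, by rw [← hj]; exact List.getElem_mem hjlt, rfl⟩
    have h4 : q ≤ pvM ap := maxD_id_isMax h3
    rw [h1, h2]
    exact ⟨rfl, by omega⟩
  have hOffNon : ∀ i ∈ pvNon ap, pvOffI ap i = 0 := by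
    intro i hi
    obtain ⟨j, rfl, hjlt, hj⟩ := mem_non hi
    rw [pvOffI_at hjlt, hj]
  have hVnn0 : ∀ x ∈ (pvAnch ap ++ pvNon ap), 0 ≤ pvV seqs ap x := by
    intro x hx
    unfold pvV
    rcases List.mem_append.1 hx with h | h
    · rw [(hOffAnch x h).1]
      exact add_nonneg (hOffAnch x h).2 (hSeqLen x)
    · exact add_nonneg (by rw [hOffNon x h]) (hSeqLen x)
  by_cases ha : pvAnch ap = []
  · -- no anchors: both sides pad every sequence to the common maximum length
    have hl : seqs.length = ap.length := by
      rcases hpre with hl | ⟨hany, _⟩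
      · exact hl
      · rw [(anch_nil_iff ap).1 ha] at hany
        cases hany
    have hnon : pvNon ap = PySem.List.pyRange 0 (ap.length : Int) 1 := non_empty_case ap ha
    have hran : PySem.List.pyRange 0 (seqs.length : Int) 1 = pvNon ap := by rw [hnon, hl]
    have hLzero : pvL seqs ap = pvMax (seqs.map (fun s => (s.toList.length : Int))) := by
      show PySem.List.maxD ((pvAnch ap ++ pvNon ap).map (pvV seqs ap)) (fun x => x) 0 = _
      rw [maxD_eq, max?_getD_eq_pvMax _ (fun x hx => by
            obtain ⟨i, hi, rfl⟩ := List.mem_map.1 hx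
            exact hVnn0 i hi)]
      congr 1
      rw [ha, List.nil_append]
      calc (pvNon ap).map (pvV seqs ap)
          = (pvNon ap).map (fun i => ((pvSeq seqs i).length : Int)) := by
            apply List.map_congr_left
            intro i hi
            unfold pvV
            rw [hOffNon i hi, zero_add]
        _ = ((PySem.List.pyRange 0 (seqs.length : Int) 1).map
              (fun i => PySem.List.pyGetD seqs i "")).map (fun s => (s.toList.length : Int)) := by
            rw [← hran, List.map_map]; rfl
        _ = seqs.map (fun s => (s.toList.length : Int)) := by
            rw [PySem.List.map_pyGetD_pyRange_zero']
    have hmaxLen : pvMaxLen0 seqs = pvL seqs ap := by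
      unfold pvMaxLen0
      rw [hLzero]
      split
      · exact max?_getD_eq_pvMax _ (by
          rintro x hx
          obtain ⟨s, _, rfl⟩ := List.mem_map.1 hx
          exact Int.natCast_nonneg _)
      · next h =>
        rw [not_ne_iff.1 h]
        rfl
    have hc1 : seqs.map (fun s => String.ofList (s.toList ++ pvGaps (pvMaxLen0 seqs - (s.toList.length : Int))))
        = (pvNon ap).map (fun i =>
            String.ofList (pvGaps (pvOffI ap i) ++ pvSeq seqs i ++
              pvGaps (pvL seqs ap - pvOffI ap i - ((pvSeq seqs i).length : Int)))) := by
      rw [hmaxLen]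
      calc seqs.map (fun s => String.ofList (s.toList ++ pvGaps (pvL seqs ap - (s.toList.length : Int))))
          = ((PySem.List.pyRange 0 (seqs.length : Int) 1).map
              (fun i => PySem.List.pyGetD seqs i "")).map
              (fun s => String.ofList (s.toList ++ pvGaps (pvL seqs ap - (s.toList.length : Int)))) := by
            rw [PySem.List.map_pyGetD_pyRange_zero']
        _ = (PySem.List.pyRange 0 (seqs.length : Int) 1).map
              (fun i => String.ofList (pvSeq seqs i ++ pvGaps (pvL seqs ap - ((pvSeq seqs i).length : Int)))) := by
            rw [List.map_map]; rfl
        _ = (pvNon ap).map (fun i =>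
              String.ofList (pvGaps (pvOffI ap i) ++ pvSeq seqs i ++
                pvGaps (pvL seqs ap - pvOffI ap i - ((pvSeq seqs i).length : Int)))) := by
            rw [hran]
            apply List.map_congr_left
            intro i hi
            rw [hOffNon i hi, pvGaps_zero, List.nil_append, sub_zero]
    unfold align_sequences_by_anchors align_sequences_by_anchors_alt
    rw [if_pos ha, ha, List.nil_append]
    refine congrArg₂ Prod.mk ?_ (congrArg₂ Prod.mk rfl ?_)
    · exact hc1
    · exact hran
  · -- at least one anchor
    have hAAne : pvAA seqs ap ≠ [] := by
      unfold pvAA; simpa using ha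
    have hM : pvM ap = pvMaxA ap := by
      unfold pvM pvMaxA
      rw [anch_map_pos, maxD_eq]
    have hAAmap : (pvAA seqs ap).map (fun s => (s.length : Int)) = (pvAnch ap).map (pvV seqs ap) := by
      unfold pvAA
      rw [List.map_map]
      apply List.map_congr_left
      intro i hi
      obtain ⟨hoff, hpos⟩ := hOffAnch i hi
      simp only [Function.comp_apply]
      unfold pvV
      rw [hoff, ← hM, List.length_append]
      unfold pvGaps
      rw [List.length_replicate]
      push_cast
      rw [Int.toNat_of_nonneg hpos]
    have hML : pvML seqs ap = pvMax ((pvAnch ap).map (pvV seqs ap)) := by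
      unfold pvML
      rw [if_pos hAAne, hAAmap, max?_getD_eq_pvMax]
      intro x hx
      obtain ⟨i, hi, rfl⟩ := List.mem_map.1 hx
      exact hVnn0 i (List.mem_append_left _ hi)
    have hMLnn : 0 ≤ pvML seqs ap := by
      rw [hML]; exact pvMax_nonneg _
    have hL : pvL seqs ap
        = max (pvMax ((pvAnch ap).map (pvV seqs ap))) (pvMax ((pvNon ap).map (pvV seqs ap))) := by
      show PySem.List.maxD ((pvAnch ap ++ pvNon ap).map (pvV seqs ap)) (fun x => x) 0 = _
      rw [maxD_eq, max?_getD_eq_pvMax _ (fun x hx => by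
            obtain ⟨i, hi, rfl⟩ := List.mem_map.1 hx
            exact hVnn0 i hi)]
      rw [List.map_append, pvMax_append]
    by_cases hn : pvNon ap = []
    · -- no non-anchored sequence: A skips the re-padding stage
      have hANnil : pvAN seqs ap = [] := by
        unfold pvAN; rw [hn]; rfl
      have hL' : pvL seqs ap = pvML seqs ap := by
        rw [hL, hn, hML, List.map_nil]
        exact max_eq_left (pvMax_nonneg _)
      unfold align_sequences_by_anchors align_sequences_by_anchors_alt
      rw [if_neg ha, if_neg (not_not_intro hANnil), hANnil, hn, List.append_nil, List.append_nil]
      refine congrArg₂ Prod.mk ?_ (congrArg₂ Prod.mk rfl rfl)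
      unfold pvAA2 pvAA
      rw [List.map_map, List.map_map]
      apply List.map_congr_left
      intro i hi
      obtain ⟨hoff, hpos⟩ := hOffAnch i hi
      simp only [Function.comp_apply]
      rw [hoff, ← hM, ← hL']
      have hlen : ((pvGaps (pvM ap - pvPos ap i) ++ pvSeq seqs i).length : Int)
          = (pvM ap - pvPos ap i) + ((pvSeq seqs i).length : Int) := by
        rw [List.length_append]
        unfold pvGaps
        rw [List.length_replicate]
        push_cast
        rw [Int.toNat_of_nonneg hpos]
      rw [hlen, List.append_assoc,
        show pvL seqs ap - ((pvM ap - pvPos ap i) + ((pvSeq seqs i).length : Int))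
          = pvL seqs ap - (pvM ap - pvPos ap i) - ((pvSeq seqs i).length : Int) from by ring]
      rw [← List.append_assoc]
    · -- non-anchored sequences present: A re-pads everything to the final length
      have hANne : pvAN seqs ap ≠ [] := by
        unfold pvAN; simpa using hn
      have hMLle2 : pvML seqs ap ≤ pvML2 seqs ap := by
        unfold pvML2; exact le_max_left _ _
      have hANlen : (pvAN seqs ap).map (fun s => (s.length : Int))
          = (pvNon ap).map (fun i => max (pvV seqs ap i) (pvML seqs ap)) := by
        unfold pvAN
        rw [List.map_map]
        apply List.map_congr_left
        intro i hi
        have hoff := hOffNon i hi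
        have hVi : pvV seqs ap i = ((pvSeq seqs i).length : Int) := by
          unfold pvV; rw [hoff, zero_add]
        simp only [Function.comp_apply]
        split_ifs with hlt
        · rw [List.length_append]
          unfold pvGaps
          rw [List.length_replicate]
          push_cast
          rw [Int.toNat_of_nonneg (by omega : (0:Int) ≤ pvML seqs ap - ((pvSeq seqs i).length : Int))]
          rw [hVi, max_eq_right (le_of_lt hlt)]
          ring
        · rw [hVi, max_eq_left (not_lt.1 hlt)]
      have hML2 : pvML2 seqs ap = pvL seqs ap := by
        unfold pvML2
        rw [hANlen, max?_getD_eq_pvMax _ (fun x hx => by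
              obtain ⟨i, hi, rfl⟩ := List.mem_map.1 hx
              exact le_trans hMLnn (le_max_right _ _)),
          pvMax_map_max _ _ _ hn, hL, hML,
          max_comm (pvMax ((pvNon ap).map (pvV seqs ap))) (pvMax ((pvAnch ap).map (pvV seqs ap))),
          ← max_assoc, max_self]
      unfold align_sequences_by_anchors align_sequences_by_anchors_alt
      rw [if_neg ha, if_pos hANne, List.map_append, List.map_append]
      refine congrArg₂ Prod.mk ?_ (congrArg₂ Prod.mk rfl rfl)
      congr 1
      · -- anchored half
        unfold pvAA2 pvAA
        rw [List.map_map, List.map_map, List.map_map]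
        apply List.map_congr_left
        intro i hi
        obtain ⟨hoff, hpos⟩ := hOffAnch i hi
        have hVle : pvV seqs ap i ≤ pvML seqs ap := by
          rw [hML]; exact le_pvMax (List.mem_map_of_mem hi)
        have hVi : pvV seqs ap i = (pvM ap - pvPos ap i) + ((pvSeq seqs i).length : Int) := by
          unfold pvV; rw [hoff]
        have h2 : (0:Int) ≤ pvML seqs ap - ((pvM ap - pvPos ap i) + ((pvSeq seqs i).length : Int)) := by
          rw [← hVi]; omega
        simp only [Function.comp_apply]
        rw [hoff, ← hM, ← hML2]
        have hlen1 : ((pvGaps (pvM ap - pvPos ap i) ++ pvSeq seqs i).length : Int)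
            = (pvM ap - pvPos ap i) + ((pvSeq seqs i).length : Int) := by
          rw [List.length_append]
          unfold pvGaps
          rw [List.length_replicate]
          push_cast
          rw [Int.toNat_of_nonneg hpos]
        have hlen2 : (((pvGaps (pvM ap - pvPos ap i) ++ pvSeq seqs i) ++
              pvGaps (pvML seqs ap - ((pvGaps (pvM ap - pvPos ap i) ++ pvSeq seqs i).length : Int))).length : Int)
            = pvML seqs ap := by
          simp only [List.length_append, pvGaps, List.length_replicate]
          push_cast
          omega
        rw [hlen2, hlen1,
          gaps_merge _ _ _ h2 (by omega : (0:Int) ≤ pvML2 seqs ap - pvML seqs ap),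
          show pvML seqs ap - ((pvM ap - pvPos ap i) + ((pvSeq seqs i).length : Int))
              + (pvML2 seqs ap - pvML seqs ap)
            = pvML2 seqs ap - (pvM ap - pvPos ap i) - ((pvSeq seqs i).length : Int) from by ring,
          List.append_assoc]
      · -- non-anchored half
        unfold pvAN
        rw [List.map_map, List.map_map]
        apply List.map_congr_left
        intro i hi
        have hoff := hOffNon i hi
        simp only [Function.comp_apply]
        rw [hoff, ← hML2, pvGaps_zero, List.nil_append, sub_zero]
        split_ifs with hlt
        · have h3 : (0:Int) ≤ pvML seqs ap - ((pvSeq seqs i).length : Int) := by omega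
          have hlen3 : ((pvSeq seqs i ++ pvGaps (pvML seqs ap - ((pvSeq seqs i).length : Int))).length : Int)
              = pvML seqs ap := by
            simp only [List.length_append, pvGaps, List.length_replicate]
            push_cast
            omega
          rw [hlen3, gaps_merge _ _ _ h3 (by omega : (0:Int) ≤ pvML2 seqs ap - pvML seqs ap),
            show pvML seqs ap - ((pvSeq seqs i).length : Int) + (pvML2 seqs ap - pvML seqs ap)
              = pvML2 seqs ap - ((pvSeq seqs i).length : Int) from by ring]
        · rfl

-- ===== VERDICT (by name: the statement is the Claim_ definition above) =====
theorem align_sequences_by_anchors_spec : Claim_equal_align_sequences_by_anchors := by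
  intro sequences anchor_positions k _ hPre
  unfold Spec_align_sequences_by_anchors
  exact pv_main sequences anchor_positions k hPre
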